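-- pv_equiv track=rewrite | github.com/CDonners/Homebrew-Base-Conversions | dec_to_bin.py | bin_debeautify
-- ===== SOURCE A (Python) =====
-- def bin_debeautify(binstr: str):
--     debeautified_bin = ""
--     for i in binstr:
--         if i == " ":
--             pass
--         elif i == "0" and len(debeautified_bin) != 0:
--             debeautified_bin = debeautified_bin + i
--         elif i == "1":
--             debeautified_bin = debeautified_bin + i
--     return debeautified_bin
-- ===== SOURCE B (Python) =====
-- def bin_debeautify(binstr: str):
--     filtered = "".join(c for c in binstr if c in "01")
--     return filtered.lstrip("0")
-- ===== Notes on version B (the rewrite author's own statement) =====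
-- stated objective: idiomatic
-- what changed: Replaces the single stateful loop (whose len(acc)!=0 guard suppresses leading zeros) with a two-pass pipeline: filter to binary digits via join, then lstrip leading zeros.
import Mathlib
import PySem

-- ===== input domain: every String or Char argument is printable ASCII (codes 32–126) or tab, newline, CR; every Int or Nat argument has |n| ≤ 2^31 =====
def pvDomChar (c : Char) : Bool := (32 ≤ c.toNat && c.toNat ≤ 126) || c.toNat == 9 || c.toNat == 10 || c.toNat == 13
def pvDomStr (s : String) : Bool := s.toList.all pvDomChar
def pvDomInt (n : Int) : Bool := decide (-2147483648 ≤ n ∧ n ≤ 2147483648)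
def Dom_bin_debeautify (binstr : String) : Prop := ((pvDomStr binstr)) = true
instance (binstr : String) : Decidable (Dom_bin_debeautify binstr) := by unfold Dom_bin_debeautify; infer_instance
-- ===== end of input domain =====

-- B replaces A's single stateful loop (leading zeros suppressed via a len!=0 guard) with a
-- two-pass pipeline: filter to the binary digits, then strip leading zeros (idiomatic; same result).

-- ===== PORT A =====
-- A's loop over the characters; accumulator = the string built so far (as List Char)
def binDebLoop (l : List Char) (acc : List Char) : List Char :=
  match l with
  | [] => acc
  | c :: t =>
    if c = ' ' then binDebLoop t acc
    else if c = '0' ∧ acc.length ≠ 0 then binDebLoop t (acc ++ [c])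
    else if c = '1' then binDebLoop t (acc ++ [c])
    else binDebLoop t acc

def bin_debeautify (binstr : String) : String :=
  String.mk (binDebLoop binstr.toList [])

-- ===== PORT B =====
def bin_debeautify_alt (binstr : String) : String :=
  let filtered := binstr.toList.filter (fun c => c = '0' ∨ c = '1')
  String.mk (filtered.dropWhile (fun c => c = '0'))

-- ===== PRECONDITION & SPEC =====
def Spec_bin_debeautify (binstr : String) (out : String) : Prop := out = bin_debeautify_alt binstr
instance (binstr : String) (out : String) : Decidable (Spec_bin_debeautify binstr out) := by unfold Spec_bin_debeautify; infer_instance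

-- ===== CLAIM (what is proved, stated in full; the proofs are below) =====
def Claim_equal_bin_debeautify : Prop := ∀ (binstr : String), Dom_bin_debeautify binstr → Spec_bin_debeautify binstr (bin_debeautify binstr)

-- ===== LEMMAS AND PROOFS =====

-- once the accumulator is nonempty, A keeps every subsequent binary digit
theorem binDebLoop_nonempty (l : List Char) (acc : List Char) (h : acc ≠ []) :
    binDebLoop l acc = acc ++ l.filter (fun c => decide (c = '0' ∨ c = '1')) := by
  induction l generalizing acc with
  | nil => simp [binDebLoop]
  | cons c t ih =>
    rw [binDebLoop]
    split_ifs with hsp h0 h1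
    · subst hsp; rw [ih acc h]; simp
    · rw [ih _ (by simp)]; simp [h0.1]
    · rw [ih _ (by simp)]; simp [h1]
    · rw [ih acc h]
      have h0' : ¬ c = '0' := fun hc => h0 ⟨hc, by simpa using h⟩
      simp [h0', h1]

-- with an empty accumulator, A's result is the filtered digits with leading zeros dropped
theorem binDebLoop_empty (l : List Char) :
    binDebLoop l [] =
      (l.filter (fun c => decide (c = '0' ∨ c = '1'))).dropWhile (fun c => decide (c = '0')) := by
  induction l with
  | nil => simp [binDebLoop]
  | cons c t ih =>
    rw [binDebLoop]
    split_ifs with hsp h0 h1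
    · subst hsp; rw [ih]; simp
    · exact absurd h0.2 (by simp)
    · subst h1
      simp only [List.nil_append]
      rw [binDebLoop_nonempty t ['1'] (by simp)]
      simp
    · rw [ih]
      by_cases hc0 : c = '0'
      · subst hc0; simp
      · simp [hc0, h1]

-- ===== VERDICT (by name: the statement is the Claim_ definition above) =====
theorem bin_debeautify_spec : Claim_equal_bin_debeautify := by
  intro binstr _
  unfold Spec_bin_debeautify bin_debeautify bin_debeautify_alt
  rw [binDebLoop_empty]
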